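-- pv_equiv track=rewrite | github.com/prannaykaul/lvc | lvc/data/samplers.py | category_to_images_from_dict
-- ===== SOURCE A (Python) =====
-- from collections import defaultdict
--
-- def category_to_images_from_dict(dataset_dicts):
--     """
--     Compute the category to image ids dict from the dataset_dicts list
--
--     Args:
--         dataset_dicts (list[dict]): annotations in Detectron2 dataset format.
--
--     Returns:
--         dict[list]: category dict with indices list in each value
--     """
--
--     c2i = defaultdict(list)
--     for i, dataset_dict in enumerate(dataset_dicts):
--         cat_ids = {ann["category_id"]
--                    for ann in dataset_dict["annotations"]}
--         for cat_id in cat_ids: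
--             c2i[cat_id].append(i)
--
--     return c2i
-- ===== SOURCE B (Python) =====
-- from collections import defaultdict
--
-- def category_to_images_from_dict(dataset_dicts):
--     # Stage 1: per-image category sets; Stage 2: for each distinct category,
--     # its image list is computed by a scan over all images (inverted loop order).
--     image_cats = [{ann["category_id"] for ann in dd["annotations"]}
--                   for dd in dataset_dicts]
--     c2i = defaultdict(list)
--     for cat in dict.fromkeys(c for cats in image_cats for c in cats):
--         c2i[cat] = [i for i, cats in enumerate(image_cats) if cat in cats]
--     return c2i
-- ===== Notes on version B (the rewrite author's own statement) =====
-- stated objective: alternative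
-- what changed: Inverts the loop structure: instead of a single pass appending each image index into every category list as it goes, B first materialises the per-image category sets, collects the distinct categories, and then builds each category's image list by its own scan over all images.
import Mathlib
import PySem

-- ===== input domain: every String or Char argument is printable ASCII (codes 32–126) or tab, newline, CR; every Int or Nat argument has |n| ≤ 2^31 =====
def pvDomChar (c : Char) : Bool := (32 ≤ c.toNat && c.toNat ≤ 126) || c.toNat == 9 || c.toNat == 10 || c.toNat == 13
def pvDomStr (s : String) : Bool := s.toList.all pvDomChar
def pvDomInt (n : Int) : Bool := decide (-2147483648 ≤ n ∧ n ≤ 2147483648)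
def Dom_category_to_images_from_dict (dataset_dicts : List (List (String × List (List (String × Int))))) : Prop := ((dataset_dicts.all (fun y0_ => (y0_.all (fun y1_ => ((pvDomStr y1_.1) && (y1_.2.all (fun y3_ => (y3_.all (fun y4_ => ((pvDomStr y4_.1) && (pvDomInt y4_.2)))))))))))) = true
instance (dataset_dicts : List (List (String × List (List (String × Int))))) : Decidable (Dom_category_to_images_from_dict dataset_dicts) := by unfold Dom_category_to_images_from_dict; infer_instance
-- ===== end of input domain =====

-- B inverts the loop structure: it materialises the per-image category sets first, then builds each
-- distinct category's image list by its own scan over all images; return value only, no mutation.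

-- ===== PORT A =====
-- dataset_dict["annotations"] / ann["category_id"] (first-match lookup; default only reached outside Pre_)
def pvAnns (dd : List (String × List (List (String × Int)))) : List (List (String × Int)) :=
  (PySem.Dict.mk dd).getD "annotations" []

def pvCat (ann : List (String × Int)) : Int :=
  (PySem.Dict.mk ann).getD "category_id" 0

-- {ann["category_id"] for ann in dd["annotations"]}
def pvCatsSet (dd : List (String × List (List (String × Int)))) : PySem.Set Int :=
  PySem.Set.ofList ((pvAnns dd).map pvCat)

-- c2i[cat_id].append(i) on a defaultdict(list)
def pvStepA (i : Int) (d : PySem.Dict Int (List Int)) (c : Int) : PySem.Dict Int (List Int) :=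
  d.modify c [] (· ++ [i])

def category_to_images_from_dict (dataset_dicts : List (List (String × List (List (String × Int))))) : List (Int × List Int) :=
  ((PySem.List.enumerate dataset_dicts 0).foldl
    (fun c2i p => (pvCatsSet p.2).foldl (pvStepA p.1) c2i)
    PySem.Dict.empty).items

-- ===== PORT B =====
def category_to_images_from_dict_alt (dataset_dicts : List (List (String × List (List (String × Int))))) : List (Int × List Int) :=
  let image_cats := dataset_dicts.map pvCatsSet
  ((PySem.List.dedup (image_cats.flatMap (fun cats => cats))).foldl
    (fun c2i cat =>
      c2i.insert cat
        (((PySem.List.enumerate image_cats 0).filter (fun p => p.2.contains cat)).map (·.1)))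
    PySem.Dict.empty).items

-- ===== PRECONDITION & SPEC =====
-- Pre_ excludes exactly the inputs where A raises KeyError: a dataset_dict without the
-- "annotations" key or an annotation without the "category_id" key.
def Pre_category_to_images_from_dict (dataset_dicts : List (List (String × List (List (String × Int))))) : Prop :=
  ∀ dd ∈ dataset_dicts, (PySem.Dict.mk dd).contains "annotations" = true ∧
    ∀ ann ∈ (PySem.Dict.mk dd).getD "annotations" [], (PySem.Dict.mk ann).contains "category_id" = true

instance (dataset_dicts : List (List (String × List (List (String × Int))))) : Decidable (Pre_category_to_images_from_dict dataset_dicts) := by unfold Pre_category_to_images_from_dict; infer_instance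

def pvWitness_category_to_images_from_dict : (List (List (String × List (List (String × Int))))) :=
  [[("annotations", [[("category_id", 3)], [("category_id", 1)], [("category_id", 3)]])],
   [("annotations", [[("category_id", 1)]])]]

def Spec_category_to_images_from_dict (dataset_dicts : List (List (String × List (List (String × Int))))) (out : List (Int × List Int)) : Prop := out = category_to_images_from_dict_alt dataset_dicts
instance (dataset_dicts : List (List (String × List (List (String × Int))))) (out : List (Int × List Int)) : Decidable (Spec_category_to_images_from_dict dataset_dicts out) := by unfold Spec_category_to_images_from_dict; infer_instance

-- ===== CLAIM =====
def Claim_equal_category_to_images_from_dict : Prop := ∀ (dataset_dicts : List (List (String × List (List (String × Int))))), Dom_category_to_images_from_dict dataset_dicts → Pre_category_to_images_from_dict dataset_dicts → Spec_category_to_images_from_dict dataset_dicts (category_to_images_from_dict dataset_dicts)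

-- ===== LEMMAS AND PROOFS =====

-- value of a category's list after A's unconditional append loop over a Nodup key list
theorem pv_getD_foldl_stepA (i : Int) (l : List Int) (hl : l.Nodup) (d : PySem.Dict Int (List Int)) (c : Int) :
    (l.foldl (pvStepA i) d).getD c [] = d.getD c [] ++ (if c ∈ l then [i] else []) := by
  induction l generalizing d with
  | nil => simp
  | cons a l ih =>
    simp only [List.nodup_cons] at hl
    simp only [List.foldl_cons, ih hl.2, pvStepA, PySem.Dict.getD_modify]
    by_cases hca : c = a
    · subst hca
      simp [hl.1]
    · simp [hca]

-- the value A's whole loop stores under category c: the (index of every image whose set contains c)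
theorem pv_getD_A (dds : List (List (String × List (List (String × Int))))) (i : Int)
    (d : PySem.Dict Int (List Int)) (c : Int) :
    ((PySem.List.enumerate dds i).foldl (fun c2i p => (pvCatsSet p.2).foldl (pvStepA p.1) c2i) d).getD c []
      = d.getD c [] ++
        ((PySem.List.enumerate (dds.map pvCatsSet) i).filter (fun p => p.2.contains c)).map (·.1) := by
  induction dds generalizing i d with
  | nil => simp [PySem.List.enumerate_nil]
  | cons dd dds ih =>
    rw [List.map_cons, PySem.List.enumerate_cons, PySem.List.enumerate_cons,
      List.foldl_cons, ih]
    simp only [pvCatsSet]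
    rw [pv_getD_foldl_stepA i _ (PySem.Set.nodup_ofList _)]
    by_cases hc : ∃ a ∈ pvAnns dd, pvCat a = c
    · simp [hc]
    · simp [hc]

-- the keys A's loop accumulates, in order
theorem pv_keys_A (dds : List (List (String × List (List (String × Int))))) (i : Int)
    (d : PySem.Dict Int (List Int)) :
    ((PySem.List.enumerate dds i).foldl (fun c2i p => (pvCatsSet p.2).foldl (pvStepA p.1) c2i) d).keys
      = PySem.Set.update d.keys ((dds.map pvCatsSet).flatMap (fun cats => cats)) := by
  induction dds generalizing i d with
  | nil => simp [PySem.List.enumerate_nil]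
  | cons dd dds ih =>
    rw [List.map_cons, PySem.List.enumerate_cons, List.foldl_cons, ih, List.flatMap_cons,
      PySem.Set.update_append]
    congr 1
    exact PySem.Dict.keys_foldl_modify (pvCatsSet dd) [] (fun _ _ v => v ++ [i]) d

-- ===== VERDICT =====
theorem category_to_images_from_dict_spec : Claim_equal_category_to_images_from_dict := by
  intro dds _ _
  unfold Spec_category_to_images_from_dict category_to_images_from_dict category_to_images_from_dict_alt
  set flat := ((dds.map pvCatsSet).flatMap (fun cats => cats)) with hflat
  have hkeys : ((PySem.List.enumerate dds 0).foldl
      (fun c2i p => (pvCatsSet p.2).foldl (pvStepA p.1) c2i) PySem.Dict.empty).keys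
      = PySem.Set.ofList flat := by
    rw [pv_keys_A, PySem.Dict.keys_empty, PySem.Set.update_nil_left]
  have hnd : (PySem.Set.ofList flat).Nodup := PySem.Set.nodup_ofList _
  rw [PySem.Dict.items_eq_map_keys _ (by rw [hkeys]; exact hnd) [], hkeys]
  simp only [PySem.List.dedup]
  rw [PySem.Dict.items_foldl_insert_fresh _ (fun c => c) _ PySem.Dict.empty
      (fun a _ => PySem.Dict.contains_empty a) (by simpa using hnd)]
  simp only [show (PySem.Dict.empty : PySem.Dict Int (List Int)).items = [] from rfl, List.nil_append]
  refine List.map_congr_left (fun c _ => ?_)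
  rw [pv_getD_A, PySem.Dict.getD_empty, List.nil_append]
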